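-- pv_equiv track=rewrite | github.com/1500mh/langs-bench-dijkstra | python/src/main.py | stof100
-- ===== SOURCE A (Python) =====
-- def stof100(s):
-- 	result = 0
-- 	place = 2
-- 	is_decimal_place = False
-- 	for ch in s:
-- 		if ch == '.':
-- 			is_decimal_place = True
-- 			continue
-- 		result *= 10
-- 		result += ord(ch) - ord('0')
-- 		if is_decimal_place:
-- 			place -= 1
-- 			if place == 0:
-- 				break
-- 	while place > 0:
-- 		result *= 10
-- 		place -= 1
-- 	return result
-- ===== SOURCE B (Python) =====
-- def stof100(s):
--     if '.' in s:
--         i = s.index('.')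
--         int_part, rest = s[:i], s[i+1:]
--     else:
--         int_part, rest = s, ''
--     frac = rest.replace('.', '')[:2]
--     result = 0
--     for ch in int_part + frac:
--         result = result * 10 + (ord(ch) - ord('0'))
--     for _ in range(2 - len(frac)):
--         result *= 10
--     return result
-- ===== Notes on version B (the rewrite author's own statement) =====
-- stated objective: simpler
-- what changed: Replaces A's single stateful scan (decimal flag, place countdown, break, trailing while-pad) by a split at the first dot, one Horner pass over integer digits plus the first two dot-free fractional characters, and a single zero-padding step.
import Mathlib
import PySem

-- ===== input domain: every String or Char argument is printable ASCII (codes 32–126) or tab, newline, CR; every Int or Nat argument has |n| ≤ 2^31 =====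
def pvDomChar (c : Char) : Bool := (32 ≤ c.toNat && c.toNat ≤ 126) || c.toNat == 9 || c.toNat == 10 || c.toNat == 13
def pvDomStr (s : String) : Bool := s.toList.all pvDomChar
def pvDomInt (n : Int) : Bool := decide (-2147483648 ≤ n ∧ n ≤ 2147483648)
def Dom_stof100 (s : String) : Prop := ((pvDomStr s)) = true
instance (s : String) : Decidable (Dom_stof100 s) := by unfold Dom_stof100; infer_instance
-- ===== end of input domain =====

-- B replaces A's stateful flag/countdown/break loop by split-at-dot + one Horner pass + one pad step (objective: simpler).

-- ===== PORT A =====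
-- A's for-loop with early break: recursion over the char list carrying (result, place, is_decimal_place).
def stof100_loop : List Char → Int → Int → Bool → Int × Int
  | [], r, p, _ => (r, p)
  | c :: cs, r, p, dec =>
    if c = '.' then stof100_loop cs r p true
    else
      let r' := r * 10 + ((c.toNat : Int) - 48)
      if dec then
        if p - 1 = 0 then (r', 0)
        else stof100_loop cs r' (p - 1) true
      else stof100_loop cs r' p false

-- A's trailing `while place > 0: result *= 10`.
def stof100_pad (r p : Int) : Int :=
  if h : p > 0 then stof100_pad (r * 10) (p - 1) else r
termination_by p.toNat
decreasing_by omega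

def stof100 (s : String) : Int :=
  match stof100_loop s.toList 0 2 false with
  | (r, p) => stof100_pad r p

-- ===== PORT B =====
def stof100_horner (r : Int) (cs : List Char) : Int :=
  cs.foldl (fun r c => r * 10 + ((c.toNat : Int) - 48)) r

def stof100_alt (s : String) : Int :=
  let cs := s.toList
  let intPart := cs.takeWhile (· ≠ '.')
  let rest := (cs.dropWhile (· ≠ '.')).drop 1
  let frac := (rest.filter (· ≠ '.')).take 2
  let r := stof100_horner 0 (intPart ++ frac)
  (List.range (2 - frac.length)).foldl (fun r _ => r * 10) r

-- ===== PRECONDITION & SPEC =====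
def Spec_stof100 (s : String) (out : Int) : Prop := out = stof100_alt s
instance (s : String) (out : Int) : Decidable (Spec_stof100 s out) := by unfold Spec_stof100; infer_instance

-- ===== CLAIM (what is proved, stated in full; the proofs are below) =====
def Claim_equal_stof100 : Prop := ∀ (s : String), Dom_stof100 s → Spec_stof100 s (stof100 s)

-- ===== LEMMAS AND PROOFS =====

theorem stof100_pad_eq (n : Nat) : ∀ r : Int, stof100_pad r (n : Int) = r * 10 ^ n := by
  induction n with
  | zero => intro r; rw [stof100_pad]; simp
  | succ k ih =>
    intro r
    rw [stof100_pad]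
    have h : ((k : Int) + 1) > 0 := by positivity
    simp only [Nat.cast_succ, h, dif_pos, add_sub_cancel_right]
    rw [ih]
    ring

theorem stof100_horner_cons (r : Int) (c : Char) (cs : List Char) :
    stof100_horner r (c :: cs) = stof100_horner (r * 10 + ((c.toNat : Int) - 48)) cs := by
  simp [stof100_horner]

-- post-dot phase: remaining chars, non-dot chars consumed up to p of them, then padded
theorem stof100_loop_dec (cs : List Char) : ∀ (r : Int) (p : Nat), 0 < p →
    stof100_pad (stof100_loop cs r (p : Int) true).1 (stof100_loop cs r (p : Int) true).2
    = stof100_horner r ((cs.filter (· ≠ '.')).take p) *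
        10 ^ (p - ((cs.filter (· ≠ '.')).take p).length) := by
  induction cs with
  | nil =>
    intro r p _
    simp [stof100_loop, stof100_pad_eq, stof100_horner]
  | cons c cs ih =>
    intro r p hp
    by_cases hc : c = '.'
    · simp only [stof100_loop, if_pos hc, List.filter_cons, hc]
      simpa using ih r p hp
    · simp only [stof100_loop, if_neg hc, List.filter_cons]
      have hcf : (decide (c ≠ '.')) = true := by simp [hc]
      rw [hcf]
      simp only [if_true]
      by_cases hp1 : p = 1
      · subst hp1
        simp [stof100_loop, stof100_pad, stof100_horner]
      · have hp2 : 1 < p := by omega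
        have h1 : ((p : Int) - 1) ≠ 0 := by omega
        have h1' : ((p : Int) - 1) = ((p - 1 : Nat) : Int) := by omega
        rw [if_neg h1, h1']
        rw [ih _ (p - 1) (by omega)]
        rw [List.take_cons (by omega : 0 < p), stof100_horner_cons]
        have : p - 1 - ((cs.filter (fun c => decide (c ≠ '.'))).take (p - 1)).length
            = p - (c :: (cs.filter (fun c => decide (c ≠ '.'))).take (p - 1)).length := by
          simp only [List.length_cons]
          omega
        rw [this]

-- pre-dot phase
theorem stof100_loop_int (cs : List Char) : ∀ r : Int,
    stof100_pad (stof100_loop cs r 2 false).1 (stof100_loop cs r 2 false).2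
    = stof100_horner r (cs.takeWhile (· ≠ '.') ++
        ((((cs.dropWhile (· ≠ '.')).drop 1).filter (· ≠ '.')).take 2)) *
        10 ^ (2 - ((((cs.dropWhile (· ≠ '.')).drop 1).filter (· ≠ '.')).take 2).length) := by
  induction cs with
  | nil =>
    intro r
    simp [stof100_loop, stof100_horner]
    have := stof100_pad_eq 2 r
    simpa using this
  | cons c cs ih =>
    intro r
    by_cases hc : c = '.'
    · simp only [stof100_loop, if_pos hc, hc]
      have h1 : List.takeWhile (fun c => decide (c ≠ '.')) ('.' :: cs) = [] := by
        simp [List.takeWhile]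
      have h2 : List.dropWhile (fun c => decide (c ≠ '.')) ('.' :: cs) = '.' :: cs := by
        simp [List.dropWhile]
      rw [h1, h2]
      simp only [List.drop_one, List.tail_cons, List.nil_append]
      have h2' : (2 : Int) = ((2 : Nat) : Int) := by norm_num
      rw [h2']
      exact stof100_loop_dec cs r 2 (by omega)
    · simp only [stof100_loop, if_neg hc]
      have hcf : (decide (c ≠ '.')) = true := by simp [hc]
      have h1 : List.takeWhile (fun c => decide (c ≠ '.')) (c :: cs)
          = c :: List.takeWhile (fun c => decide (c ≠ '.')) cs := by
        simp [List.takeWhile, hcf]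
      have h2 : List.dropWhile (fun c => decide (c ≠ '.')) (c :: cs)
          = List.dropWhile (fun c => decide (c ≠ '.')) cs := by
        simp [List.dropWhile, hcf]
      rw [h1, h2, List.cons_append, stof100_horner_cons]
      exact ih _

theorem range_foldl_pad (n : Nat) (r : Int) :
    (List.range n).foldl (fun r _ => r * 10) r = r * 10 ^ n := by
  induction n generalizing r with
  | zero => simp
  | succ k ih =>
    rw [List.range_succ, List.foldl_append]
    simp [ih]
    ring

theorem pad_match (x : Int × Int) :
    (match x with | (r', p') => stof100_pad r' p') = stof100_pad x.1 x.2 := by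
  cases x; rfl

-- ===== VERDICT (by name: the statement is the Claim_ definition above) =====
theorem stof100_spec : Claim_equal_stof100 := by
  intro s _
  unfold Spec_stof100 stof100 stof100_alt
  rw [pad_match (stof100_loop s.toList 0 2 false), stof100_loop_int s.toList 0, range_foldl_pad]
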